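-- pv_equiv track=rewrite | github.com/vinzane123/boloo-app | shipments/views.py | auxy_list
-- ===== SOURCE A (Python) =====
-- def auxy_list(data,category):
--         result = []
--         if data and category:
--                 eav = data[category]
--                 if category == 'shipments':
--                         for i in range(0,len(eav)):
--                                 result.append(eav[i]['shipmentId'])
--                         return result
--                 elif category == 'orders':
--                         for i in range(0,len(eav)):
--                                 result.append(eav[i]['orederId'])
--                         return result
--                 elif category == 'returns':
--                         for i in range(0,len(eav)):
--                                 result.append(eav[i]['rmaId'])
--                         return result
--         else:
--                 return None
-- ===== SOURCE B (Python) =====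
-- def _extract(rows, field):
--     # recursion on the list structure, slicing off the head each step
--     if not rows:
--         return []
--     return [rows[0][field]] + _extract(rows[1:], field)
--
-- def auxy_list(data, category):
--     if not (data and category):
--         return None
--     eav = data[category]
--     for cat, field in (('shipments', 'shipmentId'),
--                        ('orders', 'orederId'),
--                        ('returns', 'rmaId')):
--         if cat == category:
--             return _extract(eav, field)
--     return None
-- ===== Notes on version B (the rewrite author's own statement) =====
-- stated objective: alternative
-- what changed: Replaces the three if/elif branches each running an index-based append loop with a scan over a (category, field) pair table that dispatches to a recursive head/tail extractor building the result by list concatenation instead of mutation.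
-- outside the precondition, e.g. on auxy_list({'shipments': []}, 'orders'): A raises KeyError, B raises KeyError; on auxy_list({'shipments': [{}]}, 'shipments'): A raises KeyError, B raises KeyError
import Mathlib
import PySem

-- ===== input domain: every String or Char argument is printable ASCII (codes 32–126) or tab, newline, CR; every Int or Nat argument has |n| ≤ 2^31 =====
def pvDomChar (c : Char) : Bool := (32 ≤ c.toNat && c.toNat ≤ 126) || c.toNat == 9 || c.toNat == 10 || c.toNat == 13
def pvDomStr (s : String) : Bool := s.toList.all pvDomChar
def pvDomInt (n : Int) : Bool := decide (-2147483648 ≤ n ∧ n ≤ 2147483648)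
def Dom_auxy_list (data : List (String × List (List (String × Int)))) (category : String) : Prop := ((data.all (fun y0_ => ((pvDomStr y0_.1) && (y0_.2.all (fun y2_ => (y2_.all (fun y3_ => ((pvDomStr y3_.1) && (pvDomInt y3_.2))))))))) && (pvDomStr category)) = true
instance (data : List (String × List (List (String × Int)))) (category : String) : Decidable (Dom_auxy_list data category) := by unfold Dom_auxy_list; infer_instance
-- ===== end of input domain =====

-- B replaces A's three if/elif index-append loops with a (category, field) table scan dispatching
-- to a recursive head/tail extractor; return value only.

-- Python dict indexing on an association list: first match (shared primitive for both ports).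
def pvLookup {α : Type} (d : List (String × α)) (k : String) : Option α :=
  (d.find? (fun p => p.1 == k)).map Prod.snd

-- ===== PORT A =====
def auxy_list (data : List (String × List (List (String × Int)))) (category : String) : Option (List Int) :=
  if data ≠ [] ∧ category ≠ "" then
    match pvLookup data category with
    | none => none  -- KeyError on data[category]; excluded by Pre_
    | some eav =>
      if category = "shipments" then
        some ((PySem.List.pyRange 0 (PySem.List.len eav) 1).foldl
          (fun result i => result ++ [(pvLookup (PySem.List.pyGetD eav i []) "shipmentId").getD 0]) [])
      else if category = "orders" then
        some ((PySem.List.pyRange 0 (PySem.List.len eav) 1).foldl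
          (fun result i => result ++ [(pvLookup (PySem.List.pyGetD eav i []) "orederId").getD 0]) [])
      else if category = "returns" then
        some ((PySem.List.pyRange 0 (PySem.List.len eav) 1).foldl
          (fun result i => result ++ [(pvLookup (PySem.List.pyGetD eav i []) "rmaId").getD 0]) [])
      else none  -- implicit fall-through: Python returns None
  else none

-- ===== PORT B =====
-- _extract: recursion on the list structure, slicing off the head each step.
def pvExtract (rows : List (List (String × Int))) (field : String) : List Int :=
  match rows with
  | [] => []
  | r :: rest => [(pvLookup r field).getD 0] ++ pvExtract rest field

-- the for-loop over the pair table with an early return, as structural recursion on the table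
def pvDispatch (eav : List (List (String × Int))) (category : String) :
    List (String × String) → Option (List Int)
  | [] => none
  | (cat, field) :: rest =>
      if cat == category then some (pvExtract eav field) else pvDispatch eav category rest

def auxy_list_alt (data : List (String × List (List (String × Int)))) (category : String) : Option (List Int) :=
  if ¬ (data ≠ [] ∧ category ≠ "") then none
  else
    match pvLookup data category with
    | none => none  -- KeyError on data[category]; excluded by Pre_
    | some eav =>
      pvDispatch eav category
        [("shipments", "shipmentId"), ("orders", "orederId"), ("returns", "rmaId")]

-- ===== PRECONDITION & SPEC =====
-- Pre_ excludes exactly the inputs where Python A raises KeyError: data and category truthy but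
-- category not a key of data, or one of the three known categories whose listed dicts miss the id field.
def Pre_auxy_list (data : List (String × List (List (String × Int)))) (category : String) : Prop :=
  ((data.isEmpty || category == "") ||
    match pvLookup data category with
    | none => false
    | some eav =>
      if category == "shipments" then eav.all (fun d => (pvLookup d "shipmentId").isSome)
      else if category == "orders" then eav.all (fun d => (pvLookup d "orederId").isSome)
      else if category == "returns" then eav.all (fun d => (pvLookup d "rmaId").isSome)
      else true) = true
instance (data : List (String × List (List (String × Int)))) (category : String) : Decidable (Pre_auxy_list data category) := by unfold Pre_auxy_list; infer_instance

def pvWitness_auxy_list : (List (String × List (List (String × Int)))) × String :=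
  ([("shipments", [[("shipmentId", 5)], [("shipmentId", 7)]])], "shipments")

def Spec_auxy_list (data : List (String × List (List (String × Int)))) (category : String) (out : Option (List Int)) : Prop := out = auxy_list_alt data category
instance (data : List (String × List (List (String × Int)))) (category : String) (out : Option (List Int)) : Decidable (Spec_auxy_list data category out) := by unfold Spec_auxy_list; infer_instance

-- ===== CLAIM (what is proved, stated in full; the proofs are below) =====
def Claim_equal_auxy_list : Prop := ∀ (data : List (String × List (List (String × Int)))) (category : String), Dom_auxy_list data category → Pre_auxy_list data category → Spec_auxy_list data category (auxy_list data category)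

-- ===== LEMMAS AND PROOFS =====

-- B's recursive extractor is the map of the field lookup.
theorem pvExtract_eq_map (eav : List (List (String × Int))) (key : String) :
    pvExtract eav key = eav.map (fun d => (pvLookup d key).getD 0) := by
  induction eav with
  | nil => rfl
  | cons r rest ih => simp [pvExtract, ih]

-- A's index loop over range(0, len(eav)) building result by appends computes the same map.
theorem pvLoop_eq_extract (eav : List (List (String × Int))) (key : String) :
    (PySem.List.pyRange 0 (PySem.List.len eav) 1).foldl
      (fun result i => result ++ [(pvLookup (PySem.List.pyGetD eav i []) key).getD 0]) []
    = pvExtract eav key := by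
  rw [PySem.List.foldl_pyRange_pyGetD eav [] (fun acc d => acc ++ [(pvLookup d key).getD 0]) [] le_rfl,
    pvExtract_eq_map]
  simpa using PySem.List.foldl_append_singleton_eq_map (fun d => (pvLookup d key).getD 0) eav []

-- ===== VERDICT (by name: the statement is the Claim_ definition above) =====
theorem auxy_list_spec : Claim_equal_auxy_list := by
  intro data category _ _
  unfold Spec_auxy_list auxy_list auxy_list_alt
  by_cases h : data ≠ [] ∧ category ≠ ""
  · rw [if_pos h, if_neg (not_not_intro h)]
    cases pvLookup data category with
    | none => rfl
    | some eav =>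
      dsimp only
      by_cases h1 : category = "shipments"
      · subst h1; rw [if_pos rfl, pvLoop_eq_extract]; rfl
      · by_cases h2 : category = "orders"
        · subst h2; rw [if_neg h1, if_pos rfl, pvLoop_eq_extract]; rfl
        · by_cases h3 : category = "returns"
          · subst h3; rw [if_neg h1, if_neg h2, if_pos rfl, pvLoop_eq_extract]; rfl
          · rw [if_neg h1, if_neg h2, if_neg h3]
            simp [pvDispatch, Ne.symm h1, Ne.symm h2, Ne.symm h3]
  · rw [if_neg h, if_pos h]
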